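-- pv_equiv track=rewrite | github.com/recepcanaltinbag/trapo-seq | src/e_insert_finder_from_bam.py | find_large_insertions
-- ===== SOURCE A (Python) =====
-- def find_large_insertions(cigar_tuples, query_start, ref_start, insertion_threshold, rev_type):
--     insertion_positions = []
--     query_pos = query_start
--     ref_pos = ref_start
--
--     for cigar_type, length in cigar_tuples:
--         if cigar_type == 0:  # Match (alignment)
--             ref_pos = ref_pos + rev_type * length
--             query_pos += length
--         elif cigar_type == 1:  # Insertion
--             if length > insertion_threshold:  # If insertion is higher than threshold
--                 insertion_positions.append((query_pos, length, ref_pos))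
--         elif cigar_type == 2:  # Deletion
--             ref_pos = ref_pos + rev_type * length
--         elif cigar_type == 4 or cigar_type == 5:
--             query_pos += length
--
--     return insertion_positions
-- ===== SOURCE B (Python) =====
-- def find_large_insertions(cigar_tuples, query_start, ref_start, insertion_threshold, rev_type):
--     # Per-op movement deltas (insertions move neither pointer).
--     qdeltas = [l if t == 0 or t == 4 or t == 5 else 0 for t, l in cigar_tuples]
--     rdeltas = [rev_type * l if t == 0 or t == 2 else 0 for t, l in cigar_tuples]
--     # Exclusive prefix sums: position BEFORE each op.
--     qpos = [query_start]
--     for d in qdeltas: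
--         qpos.append(qpos[-1] + d)
--     rpos = [ref_start]
--     for d in rdeltas:
--         rpos.append(rpos[-1] + d)
--     return [(q, l, r) for (t, l), q, r in zip(cigar_tuples, qpos, rpos)
--             if t == 1 and l > insertion_threshold]
-- ===== Notes on version B (the rewrite author's own statement) =====
-- stated objective: alternative
-- what changed: Replaces A's single fused state-machine loop by a three-phase decomposition: per-op query/ref deltas, exclusive prefix-position lists, then one filtering pass over zip(cigar, positions).
import Mathlib
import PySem

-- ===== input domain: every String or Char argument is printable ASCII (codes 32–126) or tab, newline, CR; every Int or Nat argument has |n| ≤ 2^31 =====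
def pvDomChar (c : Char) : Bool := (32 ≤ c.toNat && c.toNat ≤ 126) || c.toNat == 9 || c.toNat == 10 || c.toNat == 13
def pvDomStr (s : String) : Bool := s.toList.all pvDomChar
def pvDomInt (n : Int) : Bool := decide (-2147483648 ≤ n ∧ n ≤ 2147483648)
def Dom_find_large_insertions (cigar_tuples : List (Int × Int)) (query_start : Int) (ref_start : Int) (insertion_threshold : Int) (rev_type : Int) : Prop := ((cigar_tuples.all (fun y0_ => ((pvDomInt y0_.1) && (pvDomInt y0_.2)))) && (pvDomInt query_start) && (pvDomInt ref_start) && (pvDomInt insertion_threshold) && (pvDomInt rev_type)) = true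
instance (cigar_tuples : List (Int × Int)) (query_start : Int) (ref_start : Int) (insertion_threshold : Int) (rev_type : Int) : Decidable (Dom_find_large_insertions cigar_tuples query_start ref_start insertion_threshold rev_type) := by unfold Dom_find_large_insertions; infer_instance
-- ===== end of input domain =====

-- B: three-phase decomposition (deltas, exclusive prefix positions, filter) instead of A's fused stateful loop; same cost.
-- ===== PORT A =====
def find_large_insertions.loop : List (Int × Int) → Int → Int → Int → Int → List (Int × Int × Int) → List (Int × Int × Int)
  | [], _, _, _, _, acc => acc
  | (t, l) :: rest, qp, rp, th, rev, acc =>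
    if t = 0 then find_large_insertions.loop rest (qp + l) (rp + rev * l) th rev acc
    else if t = 1 then
      if l > th then find_large_insertions.loop rest qp rp th rev (acc ++ [(qp, l, rp)])
      else find_large_insertions.loop rest qp rp th rev acc
    else if t = 2 then find_large_insertions.loop rest qp (rp + rev * l) th rev acc
    else if t = 4 ∨ t = 5 then find_large_insertions.loop rest (qp + l) rp th rev acc
    else find_large_insertions.loop rest qp rp th rev acc

def find_large_insertions (cigar_tuples : List (Int × Int)) (query_start : Int) (ref_start : Int) (insertion_threshold : Int) (rev_type : Int) : List (Int × Int × Int) :=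
  find_large_insertions.loop cigar_tuples query_start ref_start insertion_threshold rev_type []

-- ===== PORT B =====
def find_large_insertions_alt (cigar_tuples : List (Int × Int)) (query_start : Int) (ref_start : Int) (insertion_threshold : Int) (rev_type : Int) : List (Int × Int × Int) :=
  let qdeltas := cigar_tuples.map (fun p => if p.1 = 0 ∨ p.1 = 4 ∨ p.1 = 5 then p.2 else 0)
  let rdeltas := cigar_tuples.map (fun p => if p.1 = 0 ∨ p.1 = 2 then rev_type * p.2 else 0)
  let qpos := qdeltas.scanl (· + ·) query_start
  let rpos := rdeltas.scanl (· + ·) ref_start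
  (cigar_tuples.zip (qpos.zip rpos)).filterMap
    (fun x => if x.1.1 = 1 ∧ x.1.2 > insertion_threshold then some (x.2.1, x.1.2, x.2.2) else none)

-- ===== PRECONDITION & SPEC =====
def Spec_find_large_insertions (cigar_tuples : List (Int × Int)) (query_start : Int) (ref_start : Int) (insertion_threshold : Int) (rev_type : Int) (out : List (Int × Int × Int)) : Prop := out = find_large_insertions_alt cigar_tuples query_start ref_start insertion_threshold rev_type
instance (cigar_tuples : List (Int × Int)) (query_start : Int) (ref_start : Int) (insertion_threshold : Int) (rev_type : Int) (out : List (Int × Int × Int)) : Decidable (Spec_find_large_insertions cigar_tuples query_start ref_start insertion_threshold rev_type out) := by unfold Spec_find_large_insertions; infer_instance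

-- ===== CLAIM (what is proved, stated in full; the proofs are below) =====
def Claim_equal_find_large_insertions : Prop := ∀ (cigar_tuples : List (Int × Int)) (query_start : Int) (ref_start : Int) (insertion_threshold : Int) (rev_type : Int), Dom_find_large_insertions cigar_tuples query_start ref_start insertion_threshold rev_type → Spec_find_large_insertions cigar_tuples query_start ref_start insertion_threshold rev_type (find_large_insertions cigar_tuples query_start ref_start insertion_threshold rev_type)

-- ===== LEMMAS AND PROOFS =====

lemma alt_cons (t l qs rs th rev : Int) (rest : List (Int × Int)) :
    find_large_insertions_alt ((t, l) :: rest) qs rs th rev =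
      (if t = 1 ∧ l > th then [(qs, l, rs)] else []) ++
        find_large_insertions_alt rest
          (qs + (if t = 0 ∨ t = 4 ∨ t = 5 then l else 0))
          (rs + (if t = 0 ∨ t = 2 then rev * l else 0)) th rev := by
  by_cases h : t = 1 ∧ l > th <;>
    simp only [find_large_insertions_alt, List.map_cons, List.scanl_cons, List.zip_cons_cons,
      List.filterMap_cons] <;> simp [h]

lemma loop_eq_alt (c : List (Int × Int)) :
    ∀ (qs rs th rev : Int) (acc : List (Int × Int × Int)),
      find_large_insertions.loop c qs rs th rev acc =
        acc ++ find_large_insertions_alt c qs rs th rev := by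
  induction c with
  | nil => intro qs rs th rev acc; simp [find_large_insertions.loop, find_large_insertions_alt]
  | cons hd tl ih =>
    intro qs rs th rev acc
    obtain ⟨t, l⟩ := hd
    rw [alt_cons]
    simp only [find_large_insertions.loop]
    split_ifs <;> simp_all [ih]

-- ===== VERDICT (by name: the statement is the Claim_ definition above) =====
theorem find_large_insertions_spec : Claim_equal_find_large_insertions := by
  intro c qs rs th rev _
  unfold Spec_find_large_insertions find_large_insertions
  simpa using loop_eq_alt c qs rs th rev []
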